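-- pv_equiv track=rewrite | github.com/SKNETWORKS-FAMILY-AICAMP/SKN23-FINAL-2Team | backend/services/agents/arch/sub/review/compliance.py | _dedupe_violations
-- ===== SOURCE A (Python) =====
-- def _dedupe_violations(violations: list) -> list:
--     """
--     (handle, violation_type) 쌍을 키로 위반 항목 중복을 제거합니다.
--
--     복수 LLM 청크 호출 시 동일 엔티티에 대한 위반이 중복으로 반환될 수 있습니다.
--     reason 문자열 길이가 더 긴 항목(= 더 상세한 설명)을 우선 보존합니다.
--
--     Parameters
--     ----------
--     violations : list[dict]
--         LLM이 반환한 원시 위반 항목 목록 (청크별 누적).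
--
--     Returns
--     -------
--     list[dict]
--         중복 제거된 위반 항목 목록. 입력 순서(먼저 등장한 항목) 기준으로 정렬.
--     """
--     best: dict[tuple, dict] = {}
--     for v in violations or []:
--         if not isinstance(v, dict): continue
--         key = (
--             str(v.get("handle") or ""),
--             str(v.get("violation_type") or ""),
--         )
--         existing = best.get(key)
--         if existing is None or len(str(v.get("reason") or "")) > len(str(existing.get("reason") or "")):
--             best[key] = v
--     return list(best.values())
-- ===== SOURCE B (Python) =====
-- # B: dict-free two-stage algorithm -- first collect the distinct (handle, violation_type)
-- # keys in first-appearance order, then for each key scan the whole list and pick the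
-- # earliest item with the longest reason via max() over a filtered sublist.
-- def _key(v):
--     return (str(v.get("handle") or ""), str(v.get("violation_type") or ""))
--
-- def _rlen(v):
--     return len(str(v.get("reason") or ""))
--
-- def _dedupe_violations(violations: list) -> list:
--     items = list(violations or [])
--     order = []
--     for v in items:
--         if isinstance(v, dict):
--             k = _key(v)
--             if k not in order:
--                 order.append(k)
--     return [max([v for v in items if isinstance(v, dict) and _key(v) == k], key=_rlen)
--             for k in order]
-- ===== Notes on version B (the rewrite author's own statement) =====
-- stated objective: alternative
-- what changed: Replaces A's single-pass dict of running bests by a dict-free two-stage algorithm: collect distinct keys in first-appearance order, then for each key filter the whole list and take max(key=reason length), which preserves A's earliest-among-longest tie behaviour and key order.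
import Mathlib
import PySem

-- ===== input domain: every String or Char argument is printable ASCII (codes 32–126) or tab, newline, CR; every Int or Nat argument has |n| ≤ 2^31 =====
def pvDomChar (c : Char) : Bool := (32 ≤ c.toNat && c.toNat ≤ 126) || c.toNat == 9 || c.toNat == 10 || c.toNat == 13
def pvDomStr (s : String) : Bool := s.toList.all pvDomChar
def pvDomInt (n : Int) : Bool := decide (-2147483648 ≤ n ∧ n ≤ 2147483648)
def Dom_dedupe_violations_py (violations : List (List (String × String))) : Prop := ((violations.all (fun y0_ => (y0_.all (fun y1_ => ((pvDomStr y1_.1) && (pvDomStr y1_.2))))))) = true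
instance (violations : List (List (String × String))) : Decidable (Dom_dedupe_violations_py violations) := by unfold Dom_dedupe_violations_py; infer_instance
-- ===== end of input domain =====

-- B replaces A's single-pass dict of running bests by a dict-free two-stage algorithm
-- (distinct keys in first-appearance order, then per-key filter + max); objective: alternative.
-- Under the type convention every element is a dict, so Python's isinstance guard is vacuous.

-- ===== PORT A =====
-- str(v.get(K) or "") on string-valued dicts is exactly getD with default "" (missing → "", "" → "").
def pvKeyOf (v : List (String × String)) : String × String :=
  ((PySem.Dict.mk v).getD "handle" "", (PySem.Dict.mk v).getD "violation_type" "")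

def pvRLen (v : List (String × String)) : Int :=
  PySem.Str.len ((PySem.Dict.mk v).getD "reason" "")

-- loop body of A: keep the incumbent unless absent or strictly shorter reason
def pvStepA (best : PySem.Dict (String × String) (List (String × String)))
    (v : List (String × String)) : PySem.Dict (String × String) (List (String × String)) :=
  match best.get? (pvKeyOf v) with
  | none => best.insert (pvKeyOf v) v
  | some existing => if pvRLen v > pvRLen existing then best.insert (pvKeyOf v) v else best

def dedupe_violations_py (violations : List (List (String × String))) : List (List (String × String)) :=
  (violations.foldl pvStepA PySem.Dict.empty).values

-- ===== PORT B =====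
-- first stage of B: 'if k not in order: order.append(k)'
def pvOrderStep (ks : List (String × String)) (v : List (String × String)) :
    List (String × String) :=
  if pvKeyOf v ∈ ks then ks else ks ++ [pvKeyOf v]

-- second stage of B: per key, max() over the filtered sublist (earliest longest reason)
def dedupe_violations_py_alt (violations : List (List (String × String))) : List (List (String × String)) :=
  (violations.foldl pvOrderStep []).map
    (fun k => PySem.List.maxD (violations.filter (fun v => pvKeyOf v == k)) pvRLen [])

-- ===== PRECONDITION & SPEC =====
def Spec_dedupe_violations_py (violations : List (List (String × String))) (out : List (List (String × String))) : Prop := out = dedupe_violations_py_alt violations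
instance (violations : List (List (String × String))) (out : List (List (String × String))) : Decidable (Spec_dedupe_violations_py violations out) := by unfold Spec_dedupe_violations_py; infer_instance

-- ===== CLAIM (what is proved, stated in full; the proofs are below) =====
def Claim_equal_dedupe_violations_py : Prop := ∀ (violations : List (List (String × String))), Dom_dedupe_violations_py violations → Spec_dedupe_violations_py violations (dedupe_violations_py violations)

-- ===== LEMMAS AND PROOFS =====

-- membership in the accumulated key order = membership in the keys seen so far
lemma pv_mem_orderFold (vs : List (List (String × String)))
    (ks : List (String × String)) (k : String × String) :
    k ∈ vs.foldl pvOrderStep ks ↔ k ∈ ks ∨ k ∈ vs.map pvKeyOf := by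
  induction vs generalizing ks with
  | nil => simp
  | cons v vs ih =>
      simp only [List.foldl_cons, ih, pvOrderStep, List.map_cons, List.mem_cons]
      split_ifs with h
      · constructor
        · rintro (h1 | h2)
          · exact Or.inl h1
          · exact Or.inr (Or.inr h2)
        · rintro (h1 | h1 | h1)
          · exact Or.inl h1
          · exact Or.inl (h1 ▸ h)
          · exact Or.inr h1
      · simp only [List.mem_append, List.mem_singleton]
        tauto

lemma pv_find?_beq_self {α : Type} [BEq α] [LawfulBEq α] {a : α} {l : List α}
    (h : a ∈ l) : l.find? (fun x => x == a) = some a := by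
  induction l with
  | nil => cases h
  | cons b l ih =>
      by_cases hb : b = a
      · simp [hb]
      · have : a ∈ l := by
          rcases List.mem_cons.mp h with h1 | h1
          · exact absurd h1.symm hb
          · exact h1
        simp [hb, ih this]

-- max over a snoc: replace exactly on strictly longer reason (A's update rule)
lemma pv_maxD_append (g : List (List (String × String))) (v : List (String × String))
    (h : g ≠ []) :
    PySem.List.maxD (g ++ [v]) pvRLen [] =
      if pvRLen v > pvRLen (PySem.List.maxD g pvRLen []) then v
      else PySem.List.maxD g pvRLen [] := by
  obtain ⟨m, hm⟩ : ∃ m, PySem.List.max? g pvRLen = some m := by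
    cases hmx : PySem.List.max? g pvRLen with
    | none => exact absurd ((PySem.List.max?_eq_none_iff _ _).mp hmx) h
    | some m => exact ⟨m, rfl⟩
  simp only [PySem.List.maxD, PySem.List.max?, List.foldl_append] at *
  simp only [hm, gt_iff_lt, List.foldl_cons, List.foldl_nil, Option.getD_some]
  split_ifs <;> simp

-- the invariant: A's dict items are B's ordered keys paired with B's per-key max
lemma pv_items_eq (vs : List (List (String × String))) :
    (vs.foldl pvStepA PySem.Dict.empty).items =
      (vs.foldl pvOrderStep []).map
        (fun k => (k, PySem.List.maxD (vs.filter (fun v => pvKeyOf v == k)) pvRLen [])) := by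
  induction vs using List.reverseRecOn with
  | nil => rfl
  | append_singleton vs v ih =>
      simp only [List.foldl_append, List.foldl_cons, List.foldl_nil]
      set K := pvKeyOf v with hK
      set O := vs.foldl pvOrderStep [] with hO
      set D := vs.foldl pvStepA PySem.Dict.empty with hD
      have hfilter : ∀ k, (vs ++ [v]).filter (fun w => pvKeyOf w == k) =
          vs.filter (fun w => pvKeyOf w == k) ++ (if K == k then [v] else []) := by
        intro k
        rw [List.filter_append, List.filter_singleton]
        simp only [Bool.cond_eq_ite, beq_iff_eq]
        rw [hK]
      have hget : D.get? K =
          ((O.find? (fun k => k == K)).map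
            (fun k => PySem.List.maxD (vs.filter (fun w => pvKeyOf w == k)) pvRLen [])) := by
        simp [PySem.Dict.get?, ih, List.find?_map, Function.comp_def, Option.map_map]
      by_cases hmem : K ∈ O
      · -- key already present: order unchanged, A compares with the incumbent
        have hfind : O.find? (fun k => k == K) = some K := pv_find?_beq_self hmem
        have hKin : K ∈ vs.map pvKeyOf := by
          rcases (pv_mem_orderFold vs [] K).mp (hO ▸ hmem) with h | h
          · cases h
          · exact h
        have hFne : vs.filter (fun w => pvKeyOf w == K) ≠ [] := by
          obtain ⟨w, hw, hwk⟩ := List.mem_map.mp hKin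
          intro hnil
          have : w ∈ vs.filter (fun x => pvKeyOf x == K) :=
            List.mem_filter.mpr ⟨hw, by simp [hwk]⟩
          simp [hnil] at this
        have horder : pvOrderStep O v = O := by
          unfold pvOrderStep; rw [← hK]; exact if_pos hmem
        have hcontains : D.contains K = true := by
          rw [PySem.Dict.contains_eq_isSome_get?, hget, hfind]; rfl
        rw [horder]
        have hmaxs := pv_maxD_append (vs.filter (fun w => pvKeyOf w == K)) v hFne
        unfold pvStepA
        rw [← hK, hget, hfind]
        simp only [Option.map_some]
        by_cases hcnd : pvRLen v >
            pvRLen (PySem.List.maxD (vs.filter (fun w => pvKeyOf w == K)) pvRLen [])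
        · rw [if_pos hcnd]
          simp only [PySem.Dict.insert, hcontains, if_true, ih, List.map_map]
          apply List.map_congr_left
          intro k hk
          by_cases hk0 : k = K
          · subst hk0
            simp only [Function.comp_apply, beq_self_eq_true, if_true, hfilter K,
              beq_self_eq_true]
            rw [hmaxs, if_pos hcnd]
          · have hbk : (k == K) = false := by simp [hk0]
            have hKk : (K == k) = false := by simp [Ne.symm hk0]
            simp [Function.comp_apply, hfilter k, hKk, hk0]
        · rw [if_neg hcnd, ih]
          apply List.map_congr_left
          intro k hk
          by_cases hk0 : k = K
          · subst hk0
            simp only [hfilter K, beq_self_eq_true, if_pos]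
            rw [hmaxs, if_neg hcnd]
          · have hKk : (K == k) = false := by simp [Ne.symm hk0]
            simp [hfilter k, hKk]
      · -- new key: A appends to the dict, B appends to the order
        have hfind : O.find? (fun k => k == K) = none := by
          rw [List.find?_eq_none]
          intro x hx hbeq
          exact hmem ((eq_of_beq hbeq) ▸ hx)
        have hKnotin : K ∉ vs.map pvKeyOf := fun h =>
          hmem (hO ▸ (pv_mem_orderFold vs [] K).mpr (Or.inr h))
        have hFnil : vs.filter (fun w => pvKeyOf w == K) = [] := by
          rw [List.filter_eq_nil_iff]
          intro w hw hbeq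
          exact hKnotin (List.mem_map.mpr ⟨w, hw, eq_of_beq hbeq⟩)
        have horder : pvOrderStep O v = O ++ [K] := by
          unfold pvOrderStep; rw [← hK]; exact if_neg hmem
        have hcontains : D.contains K = false := by
          rw [PySem.Dict.contains_eq_isSome_get?, hget, hfind]; rfl
        rw [horder]
        unfold pvStepA
        rw [← hK, hget, hfind]
        simp only [Option.map_none]
        simp only [PySem.Dict.insert, hcontains, Bool.false_eq_true, if_false,
          List.map_append, List.map_cons, List.map_nil, ih]
        congr 1
        · apply List.map_congr_left
          intro k hk
          have hkK : k ≠ K := fun h => hmem (h ▸ hk)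
          have hKk : (K == k) = false := by simp [Ne.symm hkK]
          simp [hfilter k, hKk]
        · simp [hfilter K, hFnil, PySem.List.maxD, PySem.List.max?]

-- ===== VERDICT (by name: the statement is the Claim_ definition above) =====
theorem dedupe_violations_py_spec : Claim_equal_dedupe_violations_py := by
  intro violations _
  show dedupe_violations_py violations = dedupe_violations_py_alt violations
  unfold dedupe_violations_py dedupe_violations_py_alt
  rw [PySem.Dict.values, pv_items_eq]
  simp [List.map_map, Function.comp_def]
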